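-- pv_equiv track=rewrite | github.com/pypi-data/pypi-mirror-401 | packages/dispatcherd/dispatcherd-2026.1.14-py3-none-any.whl/dispatcherd/cli.py | _extract_control_args_yaml
-- ===== SOURCE A (Python) =====
-- import textwrap
--
-- CONTROL_ARGS_MARKER = 'Control Args:'
--
-- def _extract_control_args_yaml(doc: str) -> str | None:
--     marker_index = doc.find(CONTROL_ARGS_MARKER)
--     if marker_index == -1:
--         return None
--     block_lines = []
--     after = doc[marker_index + len(CONTROL_ARGS_MARKER) :].splitlines()  # NOQA: E203 black and flake8 conflict
--     collecting = False
--     for line in after: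
--         if not collecting:
--             if not line.strip():
--                 continue
--             if line.startswith((' ', '\t')):
--                 collecting = True
--             else:
--                 break
--         if collecting:
--             if line.startswith((' ', '\t')):
--                 block_lines.append(line)
--             elif not line.strip():
--                 break
--             else:
--                 break
--     if not block_lines:
--         return None
--     return textwrap.dedent('\n'.join(block_lines))
-- ===== SOURCE B (Python) =====
-- import textwrap
--
-- CONTROL_ARGS_MARKER = 'Control Args:'
--
-- def _extract_control_args_yaml(doc: str) -> str | None:
--     marker_index = doc.find(CONTROL_ARGS_MARKER)
--     if marker_index == -1:
--         return None
--     body = doc[marker_index + len(CONTROL_ARGS_MARKER):].splitlines()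
--     # pass 1: drop leading whitespace-only lines
--     while body and not body[0].strip():
--         body = body[1:]
--     # pass 2: length of the maximal indented prefix
--     k = 0
--     while k < len(body) and body[k].startswith((' ', '\t')):
--         k += 1
--     if k == 0:
--         return None
--     return textwrap.dedent('\n'.join(body[:k]))
-- ===== Notes on version B (the rewrite author's own statement) =====
-- stated objective: alternative
-- what changed: Replaces A's single loop with a collecting-flag state machine by two explicit sequential passes: first drop the leading blank lines, then count and take the maximal indented prefix.
import Mathlib
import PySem

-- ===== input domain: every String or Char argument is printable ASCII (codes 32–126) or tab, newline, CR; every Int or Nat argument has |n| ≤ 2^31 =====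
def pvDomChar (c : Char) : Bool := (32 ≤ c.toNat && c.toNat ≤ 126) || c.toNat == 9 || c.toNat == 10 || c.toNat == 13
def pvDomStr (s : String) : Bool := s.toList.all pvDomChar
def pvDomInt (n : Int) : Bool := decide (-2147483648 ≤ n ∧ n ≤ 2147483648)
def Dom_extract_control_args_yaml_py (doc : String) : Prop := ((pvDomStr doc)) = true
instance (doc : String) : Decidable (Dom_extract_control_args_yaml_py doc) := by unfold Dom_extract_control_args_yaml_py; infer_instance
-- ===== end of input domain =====

-- B replaces A's single-pass `collecting`-flag state machine by two explicit sequential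
-- passes (drop leading blank lines, then take the maximal indented prefix); same result,
-- no speed claim ("alternative").

-- ===== PORT A =====

-- shared helpers for the stdlib call textwrap.dedent('\n'.join(lines)) both Pythons make,
-- ported by hand (no PySem primitive): whitespace-only lines are normalised to '',
-- the other lines lose the longest common leading run of ' '/'\t'. Exact for lines
-- containing no '\n'/'\r' (the only inputs both programs feed it).
def pvIsWsOnly (l : List Char) : Bool := l.all (fun c => c == ' ' || c == '\t')

def pvIndentOf (l : List Char) : List Char := l.takeWhile (fun c => c == ' ' || c == '\t')

def pvCommonPrefix : List Char → List Char → List Char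
  | x :: xs, y :: ys => if x == y then x :: pvCommonPrefix xs ys else []
  | _, _ => []

def pvMargin (lines : List (List Char)) : Option (List Char) :=
  (lines.filter (fun l => !pvIsWsOnly l)).foldl
    (fun m l =>
      match m with
      | none => some (pvIndentOf l)
      | some p => some (pvCommonPrefix p (pvIndentOf l)))
    none

def pvDedent (lines : List (List Char)) : List Char :=
  let ml := ((pvMargin lines).getD []).length
  PySem.Chars.join ['\n'] (lines.map (fun l => if pvIsWsOnly l then [] else l.drop ml))

-- line.startswith((' ', '\t'))
def pvIsIndent (l : List Char) : Bool :=
  PySem.Chars.startswith l [' '] || PySem.Chars.startswith l ['\t']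

-- A's `for line in after:` loop with its `collecting` flag (break = return the block)
def pvALoop : List (List Char) → Bool → List (List Char) → List (List Char)
  | [], _, block => block
  | line :: rest, collecting, block =>
    if collecting = false then
      if PySem.Chars.strip line = [] then pvALoop rest false block
      else if pvIsIndent line then pvALoop rest true (block ++ [line]) -- sets collecting, same iteration appends
      else block
    else
      if pvIsIndent line then pvALoop rest true (block ++ [line])
      else block -- empty or non-indented line: break

def extract_control_args_yaml_py (doc : String) : Option String :=
  let marker := "Control Args:".toList
  let mi := PySem.Chars.find doc.toList marker
  if mi = -1 then none
  else
    let after := PySem.Chars.splitlines (PySem.Chars.slice doc.toList (some (mi + (marker.length : Int))) none)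
    let block := pvALoop after false []
    if block = [] then none
    else some (String.ofList (pvDedent block))

-- ===== PORT B =====

-- `while body and not body[0].strip(): body = body[1:]`
def pvSkipBlank : List (List Char) → List (List Char)
  | [] => []
  | l :: rest => if PySem.Chars.strip l = [] then pvSkipBlank rest else l :: rest

-- `k = 0; while k < len(body) and body[k].startswith((' ', '\t')): k += 1`
def pvIndentCount : List (List Char) → Nat
  | [] => 0
  | l :: rest => if pvIsIndent l then pvIndentCount rest + 1 else 0

def extract_control_args_yaml_py_alt (doc : String) : Option String :=
  let marker := "Control Args:".toList
  let mi := PySem.Chars.find doc.toList marker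
  if mi = -1 then none
  else
    let body := pvSkipBlank (PySem.Chars.splitlines (PySem.Chars.slice doc.toList (some (mi + (marker.length : Int))) none))
    let k := pvIndentCount body
    if k = 0 then none
    else some (String.ofList (pvDedent (body.take k)))

-- ===== PRECONDITION & SPEC =====
def Spec_extract_control_args_yaml_py (doc : String) (out : Option String) : Prop := out = extract_control_args_yaml_py_alt doc
instance (doc : String) (out : Option String) : Decidable (Spec_extract_control_args_yaml_py doc out) := by unfold Spec_extract_control_args_yaml_py; infer_instance

-- ===== CLAIM (what is proved, stated in full; the proofs are below) =====
def Claim_equal_extract_control_args_yaml_py : Prop := ∀ (doc : String), Dom_extract_control_args_yaml_py doc → Spec_extract_control_args_yaml_py doc (extract_control_args_yaml_py doc)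

-- ===== LEMMAS AND PROOFS =====

-- in collecting mode A appends exactly the maximal indented prefix
theorem pvALoop_true (ls : List (List Char)) (block : List (List Char)) :
    pvALoop ls true block = block ++ ls.takeWhile pvIsIndent := by
  induction ls generalizing block with
  | nil => simp [pvALoop]
  | cons l rest ih =>
    simp only [pvALoop, List.takeWhile_cons]
    by_cases h : pvIsIndent l = true
    · simp [h, ih]
    · simp [h]

-- A's state machine equals B's two passes
theorem pvALoop_eq (ls : List (List Char)) :
    pvALoop ls false [] = (pvSkipBlank ls).takeWhile pvIsIndent := by
  induction ls with
  | nil => simp [pvALoop, pvSkipBlank]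
  | cons l rest ih =>
    simp only [pvALoop, pvSkipBlank]
    by_cases hs : PySem.Chars.strip l = []
    · simp [hs, ih]
    · by_cases hi : pvIsIndent l = true
      · simp [hs, hi, pvALoop_true]
      · simp [hs, hi]

theorem pvIndentCount_eq (ls : List (List Char)) :
    pvIndentCount ls = (ls.takeWhile pvIsIndent).length := by
  induction ls with
  | nil => rfl
  | cons l rest ih =>
    simp only [pvIndentCount, List.takeWhile_cons]
    by_cases h : pvIsIndent l = true
    · simp [h, ih]
    · simp [h]

theorem take_indentCount (ls : List (List Char)) :
    ls.take (pvIndentCount ls) = ls.takeWhile pvIsIndent := by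
  induction ls with
  | nil => rfl
  | cons l rest ih =>
    simp only [pvIndentCount, List.takeWhile_cons]
    by_cases h : pvIsIndent l = true
    · simp [h, ih]
    · simp [h]

theorem indentCount_zero_iff (ls : List (List Char)) :
    pvIndentCount ls = 0 ↔ ls.takeWhile pvIsIndent = [] := by
  rw [pvIndentCount_eq, List.length_eq_zero_iff]

theorem pv_main (ls : List (List Char)) :
    (if pvALoop ls false [] = [] then (none : Option String)
     else some (String.ofList (pvDedent (pvALoop ls false [])))) =
    (if pvIndentCount (pvSkipBlank ls) = 0 then none
     else some (String.ofList (pvDedent (List.take (pvIndentCount (pvSkipBlank ls)) (pvSkipBlank ls))))) := by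
  rw [pvALoop_eq, take_indentCount]
  by_cases hz : pvIndentCount (pvSkipBlank ls) = 0
  · simp [hz, (indentCount_zero_iff _).mp hz]
  · have hne : (pvSkipBlank ls).takeWhile pvIsIndent ≠ [] := fun h =>
      hz ((indentCount_zero_iff _).mpr h)
    simp [hz, hne]

-- ===== VERDICT (by name: the statement is the Claim_ definition above) =====
theorem extract_control_args_yaml_py_spec : Claim_equal_extract_control_args_yaml_py := by
  intro doc _
  unfold Spec_extract_control_args_yaml_py
  unfold extract_control_args_yaml_py extract_control_args_yaml_py_alt
  dsimp only
  by_cases hm : PySem.Chars.find doc.toList "Control Args:".toList = -1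
  · rw [if_pos hm, if_pos hm]
  · rw [if_neg hm, if_neg hm]
    exact pv_main _
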